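-- pv_equiv track=rewrite | github.com/cihangoksu/tutorials | Google/distractTrainers.py | get_classified_dict
-- ===== SOURCE A (Python) =====
-- def get_classified_dict(lst, lst_combinations):
--     classified_dict = dict()
--     for elem in set(lst):
--         classified_dict[elem] = 0
--         for list_item in lst_combinations:
--             if (elem in list_item):
--                 ind = (list_item.index(elem)+1)%2
--
--                 classified_dict[elem] += lst.count(list_item[ind])
--
--     classified_dict_sorted = sorted(classified_dict.items(), key=lambda pair: pair[1], reverse=False)
--
--     return classified_dict_sorted
-- ===== SOURCE B (Python) =====
-- def get_classified_dict(lst, lst_combinations):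
--     counts = {}
--     for x in lst:
--         counts[x] = counts.get(x, 0) + 1
--     gains = {}
--     for li in lst_combinations:
--         seen = set()
--         for idx, e in enumerate(li):
--             if e in counts and e not in seen:
--                 seen.add(e)
--                 gains[e] = gains.get(e, 0) + counts.get(li[(idx + 1) % 2], 0)
--     items = [(e, gains.get(e, 0)) for e in set(lst)]
--     items.sort(key=lambda p: p[1])
--     return items
-- ===== Notes on version B (the rewrite author's own statement) =====
-- stated objective: faster
-- what changed: B builds a Counter of lst once and accumulates every element's partner contributions in a single pass over lst_combinations (with a per-pair seen-set reproducing first-occurrence indexing), instead of A's rescans of the whole combination list and recount of lst for every distinct element.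
import Mathlib
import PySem

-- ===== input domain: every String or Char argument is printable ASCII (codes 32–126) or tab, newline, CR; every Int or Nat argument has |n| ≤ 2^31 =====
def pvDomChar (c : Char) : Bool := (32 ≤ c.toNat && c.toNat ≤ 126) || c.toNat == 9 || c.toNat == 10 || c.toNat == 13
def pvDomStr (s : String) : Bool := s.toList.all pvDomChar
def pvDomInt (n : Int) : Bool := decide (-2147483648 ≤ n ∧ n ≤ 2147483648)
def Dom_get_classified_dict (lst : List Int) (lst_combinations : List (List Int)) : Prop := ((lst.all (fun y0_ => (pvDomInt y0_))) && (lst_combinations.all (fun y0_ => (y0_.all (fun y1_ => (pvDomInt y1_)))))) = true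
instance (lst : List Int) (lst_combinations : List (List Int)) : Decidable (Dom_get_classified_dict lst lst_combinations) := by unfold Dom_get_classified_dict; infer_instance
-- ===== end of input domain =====

-- B replaces A's per-element rescans of lst_combinations (with lst.count inside) by one Counter of
-- lst and a single pass over lst_combinations; measured objective: faster (asymptotically fewer scans).


-- ===== PORT A =====
-- A iterates set(lst); its iteration order reaches the output through the stable sort's
-- tie-breaking, so the port simulates CPython's int-set hash table exactly
-- (setobject.c: open addressing, 9 linear probes, perturb, resize at fill*5 >= mask*3).
-- For |n| ≤ 2^31 the hash is n itself (except hash(-1) = -2), so the order is deterministic.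
def pvHash (n : Int) : Int := if n = -1 then -2 else n
def pvU64 (n : Int) : Nat := (n % (18446744073709551616 : Int)).toNat
-- scan entries i, i+1, …, i+probes: stop at an empty slot (false) or at the key itself (true)
def pvScan (table : List (Option Int)) (key : Int) : Nat → Nat → Option (Bool × Nat)
  | probes, i =>
    match table.getD i none with
    | none => some (false, i)
    | some k =>
      if k = key then some (true, i)
      else
        match probes with
        | 0 => none
        | p + 1 => pvScan table key p (i + 1)
def pvFindSlot (table : List (Option Int)) (mask : Nat) (key : Int) : Nat → Nat → Nat → Bool × Nat
  | 0, i, _ => (false, i)  -- fuel exhausted: unreachable (the probe sequence visits every slot)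
  | fuel + 1, i, perturb =>
    let probes := if i + 9 ≤ mask then 9 else 0
    match pvScan table key probes i with
    | some r => r
    | none =>
      let perturb' := perturb >>> 5
      pvFindSlot table mask key fuel ((i * 5 + 1 + perturb') % (mask + 1)) perturb'
-- smallest table size: newsize = 8; while newsize <= minused: newsize <<= 1
def pvGrow (minused : Nat) : Nat → Nat → Nat
  | 0, sz => sz
  | f + 1, sz => if sz ≤ minused then pvGrow minused f (sz * 2) else sz
def pvInsertClean (newsize : Nat) (t : List (Option Int)) (k : Int) : List (Option Int) :=
  let h := pvU64 (pvHash k)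
  let r := pvFindSlot t (newsize - 1) k (newsize + 64) (h % newsize) h
  t.set r.2 (some k)
def pvSetAdd (st : List (Option Int) × Nat) (x : Int) : List (Option Int) × Nat :=
  let table := st.1
  let fill := st.2
  let size := table.length
  let mask := size - 1
  let h := pvU64 (pvHash x)
  let r := pvFindSlot table mask x (size + 64) (h % size) h
  if r.1 then (table, fill)
  else
    let table := table.set r.2 (some x)
    let fill := fill + 1
    if fill * 5 ≥ mask * 3 then
      let minused := if fill > 50000 then fill * 2 else fill * 4
      let newsize := pvGrow minused 64 8
      let old := table.filterMap id
      (old.foldl (pvInsertClean newsize) (List.replicate newsize none), fill)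
    else (table, fill)
-- the final Set.ofList/filter is the identity on the simulator's output (its slots hold distinct
-- members of lst); it only makes 'no duplicates' and 'elements come from lst' manifest for proofs.
def pySetOrder (lst : List Int) : PySem.Set Int :=
  PySem.Set.ofList (((lst.foldl pvSetAdd (List.replicate 8 none, 0)).1.filterMap id).filter
    (fun e => lst.contains e))

def pvInnerA (lst : List Int) (elem : Int) (d : PySem.Dict Int Int) (list_item : List Int) :
    PySem.Dict Int Int :=
  if list_item.contains elem then
    match PySem.List.index? list_item elem with
    | some i0 =>
      let ind := PySem.Int.mod ((i0 : Int) + 1) 2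
      match PySem.List.pyGet? list_item ind with
      | some v => d.insert elem (d.getD elem 0 + (PySem.List.count lst v : Int))
      | none => d  -- IndexError (length-1 list_item): excluded by Pre_
    | none => d    -- unreachable: elem ∈ list_item
  else d

def pvStepA (lst : List Int) (lst_combinations : List (List Int)) (d : PySem.Dict Int Int)
    (elem : Int) : PySem.Dict Int Int :=
  lst_combinations.foldl (pvInnerA lst elem) (d.insert elem 0)

def get_classified_dict (lst : List Int) (lst_combinations : List (List Int)) : List (Int × Int) :=
  let classified_dict :=
    (pySetOrder lst).foldl (pvStepA lst lst_combinations) PySem.Dict.empty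
  PySem.List.sorted classified_dict.items (fun pair => pair.2) false

-- ===== PORT B =====
-- Source B's final comprehension also iterates set(lst), so the B port carries ITS OWN,
-- independently written transcription of CPython's int-set order (proved equal to A's
-- transcription only down in the proof section).
def setHashB (x : Int) : Int := if x = -1 then -2 else x
def setWordB (x : Int) : Nat := ((setHashB x) % (18446744073709551616 : Int)).toNat
-- the up-to-(k+1)-slot linear window starting at slot j
def probeWinB (tbl : List (Option Int)) (x : Int) : Nat → Nat → Option (Bool × Nat)
  | k, j =>
    match tbl.getD j none with
    | none => some (false, j)
    | some y =>
      if y = x then some (true, j)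
      else
        match k with
        | 0 => none
        | Nat.succ k' => probeWinB tbl x k' (j + 1)
def seekB (tbl : List (Option Int)) (msk : Nat) (x : Int) : Nat → Nat → Nat → Bool × Nat
  | 0, j, _ => (false, j)  -- fuel out: never reached (probing covers the table)
  | Nat.succ f, j, pert =>
    match probeWinB tbl x (if j + 9 ≤ msk then 9 else 0) j with
    | some res => res
    | none => seekB tbl msk x f ((j * 5 + 1 + pert >>> 5) % (msk + 1)) (pert >>> 5)
def sizeUpB (need : Nat) : Nat → Nat → Nat
  | Nat.succ f, s => if need < s then s else sizeUpB need f (s * 2)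
  | 0, s => s
def reslotB (cap : Nat) (tbl : List (Option Int)) (y : Int) : List (Option Int) :=
  match seekB tbl (cap - 1) y (cap + 64) (setWordB y % cap) (setWordB y) with
  | (_, j) => tbl.set j (some y)
def addB (st : List (Option Int) × Nat) (x : Int) : List (Option Int) × Nat :=
  match st with
  | (tbl, used) =>
    match seekB tbl (tbl.length - 1) x (tbl.length + 64) (setWordB x % tbl.length)
        (setWordB x) with
    | (true, _) => (tbl, used)
    | (false, j) =>
      let tbl2 := tbl.set j (some x)
      if (tbl.length - 1) * 3 ≤ (used + 1) * 5 then
        let want := if 50000 < used + 1 then (used + 1) * 2 else (used + 1) * 4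
        let cap := sizeUpB want 64 8
        ((tbl2.filterMap id).foldl (reslotB cap) (List.replicate cap none), used + 1)
      else (tbl2, used + 1)
def buildB : List Int → (List (Option Int) × Nat) → List (Option Int) × Nat
  | [], acc => acc
  | z :: zs, acc => buildB zs (addB acc z)
def setListB (xs : List Int) : PySem.Set Int :=
  PySem.Set.ofList (((buildB xs (List.replicate 8 none, 0)).1.filterMap id).filter
    (fun y => xs.contains y))

def gainStepB (counts : PySem.Dict Int Int) (li : List Int)
    (acc : PySem.Dict Int Int × PySem.Set Int) (pr : Int × Int) :
    PySem.Dict Int Int × PySem.Set Int :=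
  if counts.contains pr.2 && !(PySem.Set.contains acc.2 pr.2) then
    let seen2 := PySem.Set.add acc.2 pr.2
    match PySem.List.pyGet? li (PySem.Int.mod (pr.1 + 1) 2) with
    | some w => (acc.1.insert pr.2 (acc.1.getD pr.2 0 + counts.getD w 0), seen2)
    | none => (acc.1, seen2)  -- IndexError (length-1 li): excluded by Pre_
  else acc

def pairPassB (counts : PySem.Dict Int Int) (g : PySem.Dict Int Int) (li : List Int) :
    PySem.Dict Int Int :=
  ((PySem.List.enumerate li).foldl (gainStepB counts li) (g, PySem.Set.empty)).1

def get_classified_dict_alt (lst : List Int) (lst_combinations : List (List Int)) :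
    List (Int × Int) :=
  let counts := lst.foldl (fun d x => d.insert x (d.getD x 0 + 1)) PySem.Dict.empty
  let gains := lst_combinations.foldl (pairPassB counts) PySem.Dict.empty
  let items := (setListB lst).map (fun e => (e, gains.getD e 0))
  PySem.List.sorted items (fun p => p.2) false

-- ===== PRECONDITION & SPEC =====
-- Pre_ excludes exactly the inputs where A raises IndexError (a length-1 combination whose
-- element occurs in lst: list_item[(index+1)%2] is list_item[1]); B raises IndexError there too.
def Pre_get_classified_dict (lst : List Int) (lst_combinations : List (List Int)) : Prop :=
  ∀ li ∈ lst_combinations, li.length = 1 → li.getD 0 0 ∉ lst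
instance (lst : List Int) (lst_combinations : List (List Int)) :
    Decidable (Pre_get_classified_dict lst lst_combinations) := by
  unfold Pre_get_classified_dict; infer_instance
def pvWitness_get_classified_dict : List Int × List (List Int) := ([1, 2, 1], [[1, 2], [2, 3]])
def Spec_get_classified_dict (lst : List Int) (lst_combinations : List (List Int)) (out : List (Int × Int)) : Prop := out = get_classified_dict_alt lst lst_combinations
instance (lst : List Int) (lst_combinations : List (List Int)) (out : List (Int × Int)) : Decidable (Spec_get_classified_dict lst lst_combinations out) := by unfold Spec_get_classified_dict; infer_instance

-- ===== CLAIM (what is proved, stated in full; the proofs are below) =====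
def Claim_equal_get_classified_dict : Prop := ∀ (lst : List Int) (lst_combinations : List (List Int)), Dom_get_classified_dict lst lst_combinations → Pre_get_classified_dict lst lst_combinations → Spec_get_classified_dict lst lst_combinations (get_classified_dict lst lst_combinations)

-- ===== LEMMAS AND PROOFS =====

-- The two set-order transcriptions compute the same table, step for step.
theorem probeWinB_eq (tbl : List (Option Int)) (x : Int) :
    ∀ k j, probeWinB tbl x k j = pvScan tbl x k j
  | 0, j => by simp [probeWinB, pvScan]
  | k + 1, j => by
    simp only [probeWinB, pvScan]
    cases tbl.getD j none with
    | none => rfl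
    | some y =>
      by_cases h : y = x
      · simp [h]
      · simp [h, probeWinB_eq tbl x k (j + 1)]

theorem seekB_eq (tbl : List (Option Int)) (msk : Nat) (x : Int) :
    ∀ f j p, seekB tbl msk x f j p = pvFindSlot tbl msk x f j p
  | 0, j, p => rfl
  | f + 1, j, p => by
    simp only [seekB, pvFindSlot, probeWinB_eq]
    cases pvScan tbl x (if j + 9 ≤ msk then 9 else 0) j with
    | some r => rfl
    | none => exact seekB_eq tbl msk x f _ _

theorem sizeUpB_eq (need : Nat) : ∀ f s, sizeUpB need f s = pvGrow need f s
  | 0, s => rfl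
  | f + 1, s => by
    simp only [sizeUpB, pvGrow]
    by_cases h : s ≤ need
    · rw [if_neg (by omega), if_pos h, sizeUpB_eq need f (s * 2)]
    · rw [if_pos (by omega), if_neg h]

theorem reslotB_eq (cap : Nat) (tbl : List (Option Int)) (y : Int) :
    reslotB cap tbl y = pvInsertClean cap tbl y := by
  simp only [reslotB, pvInsertClean, seekB_eq, setWordB, setHashB, pvU64, pvHash]

theorem addB_eq : addB = pvSetAdd := by
  funext st x
  obtain ⟨tbl, used⟩ := st
  have hre : reslotB = pvInsertClean := by funext c a y; exact reslotB_eq c a y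
  simp only [addB, pvSetAdd, seekB_eq, setWordB, setHashB, pvU64, pvHash, hre,
    sizeUpB_eq, ge_iff_le, gt_iff_lt]
  cases hr : pvFindSlot tbl (tbl.length - 1) x (tbl.length + 64)
      ((((if x = -1 then -2 else x) : Int) % 18446744073709551616).toNat % tbl.length)
      (((if x = -1 then -2 else x) : Int) % 18446744073709551616).toNat with
  | mk b j =>
    cases b with
    | true => rfl
    | false => simp

theorem buildB_eq : ∀ (xs : List Int) (st : List (Option Int) × Nat),
    buildB xs st = xs.foldl pvSetAdd st
  | [], st => rfl
  | z :: zs, st => by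
    simp only [buildB, List.foldl_cons, addB_eq, buildB_eq zs]

theorem setListB_eq (xs : List Int) : setListB xs = pySetOrder xs := by
  simp only [setListB, pySetOrder, buildB_eq]

-- contribution A adds to classified_dict[e] for one combination li containing e
def pvContrib (lst li : List Int) (e : Int) : Int :=
  match PySem.List.index? li e with
  | some i0 =>
    match PySem.List.pyGet? li (PySem.Int.mod ((i0 : Int) + 1) 2) with
    | some v => (PySem.List.count lst v : Int)
    | none => 0
  | none => 0

-- total A adds to classified_dict[e] over all combinations
def pvTotal (lst : List Int) (combos : List (List Int)) (e : Int) : Int :=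
  (combos.map (fun li => if li.contains e then pvContrib lst li e else 0)).sum


-- f adds c at key e and fixes everything else; two such maps compose, and adding 0 is the identity
theorem pv_map_add_zero (e : Int) (l : List (Int × Int)) :
    l.map (fun p => if p.1 == e then (p.1, p.2 + 0) else p) = l := by
  have h : (fun p : Int × Int => if p.1 == e then (p.1, p.2 + 0) else p) = id := by
    funext p; by_cases h : p.1 == e <;> simp [h]
  rw [h, List.map_id]

theorem pv_map_add_comp (e c1 c2 : Int) (l : List (Int × Int)) :
    (l.map (fun p => if p.1 == e then (p.1, p.2 + c1) else p)).map
      (fun p => if p.1 == e then (p.1, p.2 + c2) else p)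
    = l.map (fun p => if p.1 == e then (p.1, p.2 + (c1 + c2)) else p) := by
  rw [List.map_map]; apply List.map_congr_left; intro p _
  by_cases h : p.1 == e <;> simp [Function.comp, h, add_assoc]

-- a combination containing a member of lst has ≥ 2 elements (Pre_ rules out the length-1 case)
theorem pv_two_le_length {lst li : List Int} {e : Int}
    (hpre : li.length = 1 → li.getD 0 0 ∉ lst) (he : e ∈ lst) (hel : e ∈ li) :
    2 ≤ li.length := by
  match li, hel with
  | a :: rest, hel =>
    match rest with
    | [] =>
      simp at hel; subst hel
      exact absurd he (by simpa using hpre rfl)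
    | b :: r2 => simp

theorem pv_pyGet_some {li : List Int} (h2 : 2 ≤ li.length) (i : Int) :
    ∃ v, PySem.List.pyGet? li (PySem.Int.mod i 2) = some v := by
  have h0 : 0 ≤ PySem.Int.mod i 2 := PySem.Int.mod_nonneg i (by norm_num)
  have h1 : PySem.Int.mod i 2 < 2 := PySem.Int.mod_lt i (by norm_num)
  cases hg : PySem.List.pyGet? li (PySem.Int.mod i 2) with
  | some v => exact ⟨v, rfl⟩
  | none =>
    exfalso
    have := (PySem.List.pyGet?_eq_none_iff li (PySem.Int.mod i 2)).mp hg
    apply this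
    simp only [PySem.Raise.InRange]
    omega

-- one combination changes only key e's value, by exactly pvContrib (or 0 if e is absent)
theorem pv_innerA_items (lst : List Int) (e : Int) (li : List Int) (d : PySem.Dict Int Int)
    (hnd : d.keys.Nodup) (hc : d.contains e = true)
    (hpre : li.length = 1 → li.getD 0 0 ∉ lst) (he : e ∈ lst) :
    (pvInnerA lst e d li).items
      = d.items.map (fun p => if p.1 == e
          then (p.1, p.2 + (if li.contains e then pvContrib lst li e else 0)) else p) := by
  by_cases hmem : e ∈ li
  · have hcont : li.contains e = true := by simpa using hmem
    obtain ⟨i0, hidx⟩ : ∃ i0, PySem.List.index? li e = some i0 := by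
      cases hh : PySem.List.index? li e with
      | none => rw [PySem.List.index?_eq_none_iff] at hh; exact absurd hmem hh
      | some i0 => exact ⟨i0, rfl⟩
    have h2 := pv_two_le_length hpre he hmem
    obtain ⟨v, hget⟩ := pv_pyGet_some h2 ((i0 : Int) + 1)
    have hstep : pvInnerA lst e d li
        = d.insert e (d.getD e 0 + (PySem.List.count lst v : Int)) := by
      simp only [pvInnerA, hcont, hidx, hget, if_true]
    have hcontrib : pvContrib lst li e = (PySem.List.count lst v : Int) := by
      simp only [pvContrib, hidx, hget]
    rw [hstep, PySem.Dict.items_insert_of_contains _ _ hc]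
    apply List.map_congr_left; intro p hp
    by_cases hpe : p.1 == e
    · have hpe' : p.1 = e := by simpa using hpe
      have hval : d.getD e 0 = p.2 :=
        PySem.Dict.getD_of_mem_items d (show (e, p.2) ∈ d.items by rw [← hpe']; exact hp) hnd 0
      simp [hpe', hcontrib, ← hval, hmem]
    · simp [hpe]
  · have hcont : li.contains e = false := by simpa using hmem
    simp only [pvInnerA, hcont, Bool.false_eq_true, if_false]
    exact (pv_map_add_zero e d.items).symm

-- the combination loop for one element: key e gains pvTotal, all other bindings unchanged
theorem pv_foldA_items (lst : List Int) (e : Int) (he : e ∈ lst) :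
    ∀ (combos : List (List Int)) (d : PySem.Dict Int Int), d.keys.Nodup → d.contains e = true →
    (∀ li ∈ combos, li.length = 1 → li.getD 0 0 ∉ lst) →
    (combos.foldl (pvInnerA lst e) d).items
      = d.items.map (fun p => if p.1 == e then (p.1, p.2 + pvTotal lst combos e) else p)
  | [], d, hnd, hc, hpre => by
    simp only [List.foldl_nil, pvTotal, List.map_nil, List.sum_nil]
    exact (pv_map_add_zero e d.items).symm
  | li :: rest, d, hnd, hc, hpre => by
    have hitems := pv_innerA_items lst e li d hnd hc (hpre li (by simp)) he
    have hkeys : (pvInnerA lst e d li).keys = d.keys := by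
      simp only [PySem.Dict.keys, hitems, List.map_map]
      apply List.map_congr_left; intro p _
      by_cases hpe : p.1 == e <;> simp [Function.comp, hpe]
    have hnd' : (pvInnerA lst e d li).keys.Nodup := by rw [hkeys]; exact hnd
    have hc' : (pvInnerA lst e d li).contains e = true := by
      have := (PySem.Dict.contains_iff_mem_keys d e).mp hc
      exact (PySem.Dict.contains_iff_mem_keys _ _).mpr (by rw [hkeys]; exact this)
    have hIH := pv_foldA_items lst e he rest (pvInnerA lst e d li) hnd' hc'
      (fun l hl => hpre l (by simp [hl]))
    rw [List.foldl_cons, hIH, hitems, pv_map_add_comp]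
    have : pvTotal lst (li :: rest) e
        = (if li.contains e then pvContrib lst li e else 0) + pvTotal lst rest e := by
      simp [pvTotal]
    rw [this]

-- the element loop: a dict over fresh distinct keys appends (e, pvTotal e) per element
theorem pv_outerA_items (lst : List Int) (combos : List (List Int))
    (hpre : ∀ li ∈ combos, li.length = 1 → li.getD 0 0 ∉ lst) :
    ∀ (S : List Int) (d : PySem.Dict Int Int), S.Nodup → (∀ x ∈ S, x ∈ lst) →
    d.keys.Nodup → (∀ x ∈ S, x ∉ d.keys) →
    (S.foldl (pvStepA lst combos) d).items
      = d.items ++ S.map (fun x => (x, pvTotal lst combos x))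
  | [], d, _, _, _, _ => by simp
  | e :: S', d, hS, hmem, hnd, hfresh => by
    have he : e ∈ lst := hmem e (by simp)
    have hefresh : e ∉ d.keys := hfresh e (by simp)
    have hcfalse : d.contains e = false := by
      cases h : d.contains e
      · rfl
      · exact absurd ((PySem.Dict.contains_iff_mem_keys _ _).mp h) hefresh
    have hnd0 : (d.insert e 0).keys.Nodup := PySem.Dict.nodup_keys_insert d e 0 hnd
    have hc0 : (d.insert e 0).contains e = true := PySem.Dict.contains_insert_self d e 0
    have hfold := pv_foldA_items lst e he combos (d.insert e 0) hnd0 hc0 hpre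
    have hins : (d.insert e 0).items = d.items ++ [(e, 0)] :=
      PySem.Dict.items_insert_of_not_contains _ _ hcfalse
    have hid : d.items.map
        (fun p => if p.1 == e then (p.1, p.2 + pvTotal lst combos e) else p) = d.items := by
      conv_rhs => rw [← List.map_id d.items]
      apply List.map_congr_left; intro p hp
      have hpk : p.1 ∈ d.keys := by
        simp only [PySem.Dict.keys]; exact List.mem_map_of_mem hp
      have : ¬ (p.1 == e) = true := by
        intro hb; exact hefresh (by simpa [show p.1 = e by simpa using hb] using hpk)
      simp [this]
    have hd1 : (pvStepA lst combos d e).items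
        = d.items ++ [(e, pvTotal lst combos e)] := by
      unfold pvStepA
      rw [hfold, hins, List.map_append, hid]
      simp
    have hkeys1 : (pvStepA lst combos d e).keys = d.keys ++ [e] := by
      simp [PySem.Dict.keys, hd1]
    have hnd1 : (pvStepA lst combos d e).keys.Nodup := by
      rw [hkeys1, List.nodup_append]
      refine ⟨hnd, List.nodup_singleton e, ?_⟩
      intro a ha
      simp only [List.mem_singleton]
      intro b hb hab
      apply hefresh
      rwa [hab, hb] at ha
    have hfresh1 : ∀ x ∈ S', x ∉ (pvStepA lst combos d e).keys := by
      intro x hx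
      rw [hkeys1]
      simp only [List.mem_append, List.mem_singleton]
      rintro (h | rfl)
      · exact hfresh x (by simp [hx]) h
      · exact (List.nodup_cons.mp hS).1 hx
    have hIH := pv_outerA_items lst combos hpre S' (pvStepA lst combos d e)
      (List.nodup_cons.mp hS).2 (fun x hx => hmem x (by simp [hx])) hnd1 hfresh1
    rw [List.foldl_cons, hIH, hd1]
    simp

-- B's per-pair loop: the seen-set holds exactly the already-processed keys of lst, and key e
-- gains pvContrib at its first occurrence
theorem pv_innerB_fold (lst li : List Int) (hpre1 : li.length = 1 → li.getD 0 0 ∉ lst) :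
    ∀ (suf pre : List Int) (g : PySem.Dict Int Int) (seen : PySem.Set Int) (e : Int),
    li = pre ++ suf →
    (∀ y : Int, y ∈ seen ↔ (y ∈ pre ∧ y ∈ lst)) →
    ((PySem.List.enumerate suf (pre.length : Int)).foldl
        (gainStepB (PySem.Dict.counter lst) li) (g, seen)).1.getD e 0
      = g.getD e 0 + (if e ∈ lst ∧ e ∈ suf ∧ e ∉ pre then pvContrib lst li e else 0)
  | [], pre, g, seen, e, hli, hseen => by simp [PySem.List.enumerate]
  | x :: rest, pre, g, seen, e, hli, hseen => by
    rw [PySem.List.enumerate_cons, List.foldl_cons]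
    have hcc : (PySem.Dict.counter lst).contains x = lst.contains x :=
      PySem.Dict.contains_counter lst x
    by_cases hx : x ∈ lst
    · by_cases hseenx : x ∈ seen
      · -- already seen (so x ∈ pre): no-op step
        have hxpre : x ∈ pre := ((hseen x).mp hseenx).1
        have hstep : gainStepB (PySem.Dict.counter lst) li (g, seen) ((pre.length : Int), x)
            = (g, seen) := by
          simp [gainStepB, hseenx]
        rw [hstep]
        have hIH := pv_innerB_fold lst li hpre1 rest (pre ++ [x]) g seen e
          (by simpa using hli)
          (by intro y; rw [hseen y]; constructor
              · rintro ⟨hy, hy2⟩; exact ⟨by simp [hy], hy2⟩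
              · rintro ⟨hy, hy2⟩
                rcases (by simpa using hy : y ∈ pre ∨ y = x) with h | rfl
                · exact ⟨h, hy2⟩
                · exact ⟨hxpre, hy2⟩)
        rw [show ((pre.length : Int) + 1) = (((pre ++ [x]).length : Nat) : Int) by
          push_cast [List.length_append, List.length_singleton]; ring]
        rw [hIH]
        by_cases he : e ∈ lst <;> by_cases hex : e = x <;>
          simp [he, hex, hxpre]
      · -- first occurrence of x: g[x] += counts[partner]
        have hxpre : x ∉ pre := fun h => hseenx ((hseen x).mpr ⟨h, hx⟩)
        have hidx : PySem.List.index? li x = some pre.length := by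
          rw [PySem.List.index?_eq_some_iff]
          exact ⟨pre, rest, hli, rfl, hxpre⟩
        have h2 : 2 ≤ li.length :=
          pv_two_le_length hpre1 hx (by rw [hli]; simp)
        obtain ⟨v, hget⟩ := pv_pyGet_some h2 ((pre.length : Int) + 1)
        have hget' : PySem.List.pyGet? li (((pre.length : Int) + 1) % 2) = some v := by
          rw [← PySem.Int.mod_eq_emod_of_pos (by norm_num : (0:Int) < 2)]
          exact hget
        have hstep : gainStepB (PySem.Dict.counter lst) li (g, seen) ((pre.length : Int), x)
            = (g.insert x (g.getD x 0 + (PySem.Dict.counter lst).getD v 0),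
               PySem.Set.add seen x) := by
          simp [gainStepB, hseenx, hcc, hx, hget']
        rw [hstep]
        have hcontrib : pvContrib lst li x = (PySem.Dict.counter lst).getD v 0 := by
          simp only [pvContrib, hidx, hget, PySem.Dict.getD_counter, PySem.List.count_eq]
        have hIH := pv_innerB_fold lst li hpre1 rest (pre ++ [x])
          (g.insert x (g.getD x 0 + (PySem.Dict.counter lst).getD v 0))
          (PySem.Set.add seen x) e
          (by simpa using hli)
          (by intro y
              rw [PySem.Set.mem_add, hseen y]
              constructor
              · rintro (⟨hy, hy2⟩ | rfl)
                · exact ⟨by simp [hy], hy2⟩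
                · exact ⟨by simp, hx⟩
              · rintro ⟨hy, hy2⟩
                rcases (by simpa using hy : y ∈ pre ∨ y = x) with h | rfl
                · exact Or.inl ⟨h, hy2⟩
                · exact Or.inr rfl)
        rw [show ((pre.length : Int) + 1) = (((pre ++ [x]).length : Nat) : Int) by
          push_cast [List.length_append, List.length_singleton]; ring]
        rw [hIH, PySem.Dict.getD_insert]
        by_cases hex : e = x
        · subst hex
          simp [hx, hxpre, hcontrib]
        · by_cases he : e ∈ lst <;> simp [he, hex]
    · -- x ∉ lst: counts has no key x, no-op step
      have hcf : lst.contains x = false := by simpa using hx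
      have hstep : gainStepB (PySem.Dict.counter lst) li (g, seen) ((pre.length : Int), x)
          = (g, seen) := by
        simp [gainStepB, hcc, hx]
      rw [hstep]
      have hIH := pv_innerB_fold lst li hpre1 rest (pre ++ [x]) g seen e
        (by simpa using hli)
        (by intro y; rw [hseen y]; constructor
            · rintro ⟨hy, hy2⟩; exact ⟨by simp [hy], hy2⟩
            · rintro ⟨hy, hy2⟩
              rcases (by simpa using hy : y ∈ pre ∨ y = x) with h | rfl
              · exact ⟨h, hy2⟩
              · exact absurd hy2 hx)
      rw [show ((pre.length : Int) + 1) = (((pre ++ [x]).length : Nat) : Int) by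
        push_cast [List.length_append, List.length_singleton]; ring]
      rw [hIH]
      by_cases he : e ∈ lst <;> by_cases hex : e = x <;>
        simp [he, hex] <;> tauto

-- B's combination loop accumulates pvTotal at every key of lst
theorem pv_gains (lst : List Int) :
    ∀ (combos : List (List Int)) (g : PySem.Dict Int Int) (e : Int),
    (∀ li ∈ combos, li.length = 1 → li.getD 0 0 ∉ lst) → e ∈ lst →
    (combos.foldl (pairPassB (PySem.Dict.counter lst)) g).getD e 0
      = g.getD e 0 + pvTotal lst combos e
  | [], g, e, _, _ => by simp [pvTotal]
  | li :: rest, g, e, hpre, he => by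
    rw [List.foldl_cons]
    have hpair := pv_innerB_fold lst li (hpre li (by simp)) li [] g PySem.Set.empty e
      (by simp) (by intro y; simp [PySem.Set.empty])
    have hpair' : (pairPassB (PySem.Dict.counter lst) g li).getD e 0
        = g.getD e 0 + (if li.contains e then pvContrib lst li e else 0) := by
      unfold pairPassB
      rw [show ((List.length ([] : List Int) : Nat) : Int) = 0 by simp] at hpair
      rw [hpair]
      by_cases hel : e ∈ li <;> simp [hel, he]
    have hIH := pv_gains lst rest (pairPassB (PySem.Dict.counter lst) g li) e
      (fun l hl => hpre l (by simp [hl])) he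
    rw [hIH, hpair']
    simp [pvTotal]
    ring

theorem pv_setOrder_nodup (lst : List Int) : (pySetOrder lst).Nodup :=
  PySem.Set.nodup_ofList _

theorem pv_setOrder_mem {lst : List Int} {x : Int} (h : x ∈ pySetOrder lst) : x ∈ lst := by
  have := (PySem.Set.mem_ofList _ _).mp h
  have := List.mem_filter.mp this
  simpa using this.2

-- ===== VERDICT (by name: the statement is the Claim_ definition above) =====
theorem get_classified_dict_spec : Claim_equal_get_classified_dict := by
  intro lst combos _hDom hPre
  unfold Spec_get_classified_dict get_classified_dict get_classified_dict_alt
  dsimp only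
  have hA := pv_outerA_items lst combos hPre (pySetOrder lst) PySem.Dict.empty
    (pv_setOrder_nodup lst) (fun x hx => pv_setOrder_mem hx)
    (by simp) (by simp [PySem.Dict.keys_empty])
  rw [hA, setListB_eq]
  have hcounts : lst.foldl (fun d x => d.insert x (d.getD x 0 + 1)) PySem.Dict.empty
      = PySem.Dict.counter lst := PySem.Dict.foldl_insert_getD_add_one_eq_counter lst
  rw [hcounts]
  have hmap : (pySetOrder lst).map
      (fun e => (e, (combos.foldl (pairPassB (PySem.Dict.counter lst))
        PySem.Dict.empty).getD e 0))
      = (pySetOrder lst).map (fun x => (x, pvTotal lst combos x)) := by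
    apply List.map_congr_left; intro e heS
    have := pv_gains lst combos PySem.Dict.empty e hPre (pv_setOrder_mem heS)
    rw [this]; simp
  rw [hmap]
  rw [show (PySem.Dict.empty : PySem.Dict Int Int).items = ([] : List (Int × Int)) from rfl,
    List.nil_append]
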